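-- pv_equiv track=rewrite | github.com/swhh/project_euler_problems | problem_96.py | squares_possible_fit
-- ===== SOURCE A (Python) =====
-- def squares_possible_fit(square_one, square_two, square_three):
--     rows_one = (set(triple) for triple in zip(*square_one))
--     rows_two = (set(triple) for triple in zip(*square_two))
--     rows_three = (set(triple) for triple in zip(*square_three))
--
--     for a, b, c in zip(rows_one, rows_two, rows_three):
--         if a.intersection(b) or b.intersection(c) or c.intersection(a):
--             return False
--     return True
-- ===== SOURCE B (Python) =====
-- def squares_possible_fit(square_one, square_two, square_three):
--     for columns in zip(zip(*square_one), zip(*square_two), zip(*square_three)):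
--         owner = {}
--         for idx, col in enumerate(columns):
--             for v in col:
--                 if owner.setdefault(v, idx) != idx:
--                     return False
--     return True
-- ===== Notes on version B (the rewrite author's own statement) =====
-- stated objective: alternative
-- what changed: Replaces the three pairwise set-intersection tests per column with a single incremental ownership dictionary (value -> first square index) walked over the three columns, returning False on the first value owned by a different square.
import Mathlib
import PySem

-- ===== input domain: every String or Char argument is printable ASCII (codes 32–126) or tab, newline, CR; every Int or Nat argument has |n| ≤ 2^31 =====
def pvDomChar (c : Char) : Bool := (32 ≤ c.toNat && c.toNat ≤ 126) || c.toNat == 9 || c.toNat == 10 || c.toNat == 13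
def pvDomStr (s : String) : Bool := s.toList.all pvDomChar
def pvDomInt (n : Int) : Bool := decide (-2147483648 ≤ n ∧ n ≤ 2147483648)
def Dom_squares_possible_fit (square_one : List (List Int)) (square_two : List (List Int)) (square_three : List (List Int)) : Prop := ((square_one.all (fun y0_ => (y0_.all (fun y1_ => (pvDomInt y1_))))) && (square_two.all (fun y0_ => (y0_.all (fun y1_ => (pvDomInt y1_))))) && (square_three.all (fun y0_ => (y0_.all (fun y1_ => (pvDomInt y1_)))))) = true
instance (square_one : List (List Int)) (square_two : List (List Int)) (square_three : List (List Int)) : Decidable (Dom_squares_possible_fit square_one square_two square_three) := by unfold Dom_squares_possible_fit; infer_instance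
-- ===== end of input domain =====

-- B replaces the three pairwise set-intersection tests per column with one incremental
-- ownership dictionary (value -> first square index); objective: alternative (same cost).

-- shared helper: Python's zip(*rows) — columns, truncated to the shortest row; empty when rows is empty
def pyZipStar (rows : List (List Int)) : List (List Int) :=
  if h : rows.isEmpty ∨ rows.any List.isEmpty then []
  else (rows.map (fun r => r.headD 0)) :: pyZipStar (rows.map List.tail)
termination_by (rows.headD []).length
decreasing_by
  cases rows with
  | nil => exact absurd (Or.inl (by simp)) h
  | cons r rs =>
    have hr : r ≠ [] := fun hh => h (Or.inr (by simp [hh]))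
    have hl : 0 < r.length := List.length_pos_iff.mpr hr
    simp only [List.map_cons, List.headD_cons]
    simp [List.length_tail]
    omega

-- ===== PORT A =====
-- A's per-column test: pairwise set intersections (truthy = nonempty)
def interCheckA (t : List Int × List Int × List Int) : Bool :=
  let a := PySem.Set.ofList t.1
  let b := PySem.Set.ofList t.2.1
  let c := PySem.Set.ofList t.2.2
  !(!(PySem.Set.inter a b).isEmpty || !(PySem.Set.inter b c).isEmpty || !(PySem.Set.inter c a).isEmpty)

def squares_possible_fit (square_one : List (List Int)) (square_two : List (List Int)) (square_three : List (List Int)) : Bool :=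
  ((pyZipStar square_one).zip ((pyZipStar square_two).zip (pyZipStar square_three))).all interCheckA

-- ===== PORT B =====
-- inner loop of B: 'for v in col: if owner.setdefault(v, idx) != idx: return False' (none = early False)
def ownLoop (d : PySem.Dict Int Int) (idx : Int) : List Int → Option (PySem.Dict Int Int)
  | [] => some d
  | v :: rest =>
    let owner := d.getD v idx
    let d' := d.setdefault v idx
    if owner ≠ idx then none else ownLoop d' idx rest

-- 'for idx, col in enumerate(columns)' over the 3-tuple of columns, unrolled
def colOwnerCheck (t : List Int × List Int × List Int) : Bool :=
  match ownLoop PySem.Dict.empty 0 t.1 with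
  | none => false
  | some d1 =>
    match ownLoop d1 1 t.2.1 with
    | none => false
    | some d2 => (ownLoop d2 2 t.2.2).isSome

def squares_possible_fit_alt (square_one : List (List Int)) (square_two : List (List Int)) (square_three : List (List Int)) : Bool :=
  ((pyZipStar square_one).zip ((pyZipStar square_two).zip (pyZipStar square_three))).all colOwnerCheck

-- ===== PRECONDITION & SPEC =====
def Spec_squares_possible_fit (square_one : List (List Int)) (square_two : List (List Int)) (square_three : List (List Int)) (out : Bool) : Prop := out = squares_possible_fit_alt square_one square_two square_three
instance (square_one : List (List Int)) (square_two : List (List Int)) (square_three : List (List Int)) (out : Bool) : Decidable (Spec_squares_possible_fit square_one square_two square_three out) := by unfold Spec_squares_possible_fit; infer_instance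

-- ===== CLAIM (what is proved, stated in full; the proofs are below) =====
def Claim_equal_squares_possible_fit : Prop := ∀ (square_one : List (List Int)) (square_two : List (List Int)) (square_three : List (List Int)), Dom_squares_possible_fit square_one square_two square_three → Spec_squares_possible_fit square_one square_two square_three (squares_possible_fit square_one square_two square_three)

-- ===== LEMMAS AND PROOFS =====

theorem ownLoop_eq_none_iff (idx : Int) (vs : List Int) : ∀ (d : PySem.Dict Int Int),
    ownLoop d idx vs = none ↔ ∃ v ∈ vs, ∃ j, d.get? v = some j ∧ j ≠ idx := by
  induction vs with
  | nil => intro d; simp [ownLoop]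
  | cons v rest ih =>
    intro d
    simp only [ownLoop]
    by_cases hc : d.getD v idx ≠ idx
    · simp only [if_pos hc, true_iff]
      refine ⟨v, by simp, ?_⟩
      cases hg : d.get? v with
      | none => exact absurd (by simp [PySem.Dict.getD_eq_get?_getD, hg]) hc
      | some j =>
        exact ⟨j, rfl, by simpa [PySem.Dict.getD_eq_get?_getD, hg] using hc⟩
    · rw [if_neg hc]
      push_neg at hc
      rw [ih]
      have hv : ∀ x, (d.setdefault v idx).get? x = if x = v then some idx else d.get? x := by
        intro x
        by_cases hx : x = v
        · subst hx
          rw [PySem.Dict.get?_setdefault_self]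
          simp only [if_pos rfl]
          cases hg : d.get? x with
          | none => simp
          | some j =>
            have : j = idx := by simpa [PySem.Dict.getD_eq_get?_getD, hg] using hc
            simp [this]
        · rw [PySem.Dict.get?_setdefault_of_ne d idx hx, if_neg hx]
      have hnoconf : ∀ x, x = v → ¬ ∃ j, d.get? x = some j ∧ j ≠ idx := by
        rintro x rfl ⟨j, hg, hj⟩
        exact hj (by simpa [PySem.Dict.getD_eq_get?_getD, hg] using hc)
      constructor
      · rintro ⟨w, hw, j, hg, hj⟩
        rw [hv w] at hg
        by_cases hwv : w = v
        · simp [if_pos hwv] at hg; exact absurd hg.symm hj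
        · exact ⟨w, by simp [hw], j, by simpa [if_neg hwv] using hg, hj⟩
      · rintro ⟨w, hw, j, hg, hj⟩
        rcases List.mem_cons.mp hw with hwv | hwr
        · exact absurd ⟨j, hg, hj⟩ (hnoconf w hwv)
        · by_cases hwv : w = v
          · exact absurd ⟨j, hg, hj⟩ (hnoconf w hwv)
          · exact ⟨w, hwr, j, by rw [hv w, if_neg hwv]; exact hg, hj⟩

theorem ownLoop_some_get? (idx : Int) (vs : List Int) : ∀ (d d' : PySem.Dict Int Int),
    ownLoop d idx vs = some d' →
    ∀ x, d'.get? x = if d.get? x = none ∧ x ∈ vs then some idx else d.get? x := by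
  induction vs with
  | nil => intro d d' h x; simp [ownLoop] at h; simp [h]
  | cons v rest ih =>
    intro d d' h x
    simp only [ownLoop] at h
    by_cases hc : d.getD v idx ≠ idx
    · rw [if_pos hc] at h; exact absurd h (by simp)
    · rw [if_neg hc] at h
      push_neg at hc
      have hv : ∀ y, (d.setdefault v idx).get? y = if y = v ∧ d.get? y = none then some idx else d.get? y := by
        intro y
        by_cases hy : y = v
        · subst hy
          rw [PySem.Dict.get?_setdefault_self]
          cases hg : d.get? y with
          | none => simp
          | some j => simp [hg]
        · rw [PySem.Dict.get?_setdefault_of_ne d idx hy, if_neg (by tauto)]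
      have := ih _ _ h x
      rw [this, hv x]
      by_cases hx : x = v
      · subst hx
        cases hg : d.get? x with
        | none => simp [hg]
        | some j => simp [hg]
      · cases hg : d.get? x with
        | none => simp [hg, hx, List.mem_cons]
        | some j => simp [hg, hx]

-- state after processing the first column from the empty dict
theorem ownLoop_first (ta : List Int) :
    ∃ d1, ownLoop PySem.Dict.empty 0 ta = some d1 ∧
      ∀ x, d1.get? x = if x ∈ ta then some (0 : Int) else none := by
  cases h : ownLoop PySem.Dict.empty 0 ta with
  | none =>
    rw [ownLoop_eq_none_iff] at h
    obtain ⟨v, _, j, hg, _⟩ := h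
    simp [PySem.Dict.get?_empty] at hg
  | some d1 =>
    refine ⟨d1, rfl, fun x => ?_⟩
    have := ownLoop_some_get? 0 ta _ _ h x
    simpa [PySem.Dict.get?_empty] using this

theorem colOwnerCheck_iff (t : List Int × List Int × List Int) :
    colOwnerCheck t = true ↔
      (∀ v ∈ t.2.1, v ∉ t.1) ∧ (∀ v ∈ t.2.2, v ∉ t.1 ∧ v ∉ t.2.1) := by
  obtain ⟨ta, tb, tc⟩ := t
  obtain ⟨d1, h1, hd1⟩ := ownLoop_first ta
  cases h2 : ownLoop d1 1 tb with
  | none =>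
    have hcc : colOwnerCheck (ta, tb, tc) = false := by simp [colOwnerCheck, h1, h2]
    rw [hcc]
    simp only [Bool.false_eq_true, false_iff]
    rw [ownLoop_eq_none_iff] at h2
    obtain ⟨v, hv, j, hg, hj⟩ := h2
    rw [hd1 v] at hg
    by_cases hm : v ∈ ta
    · rintro ⟨hc1, _⟩; exact (hc1 v hv) hm
    · simp [hm] at hg
  | some d2 =>
    have hd2 : ∀ x, d2.get? x =
        if x ∈ ta then some (0 : Int) else if x ∈ tb then some 1 else none := by
      intro x
      have := ownLoop_some_get? 1 tb _ _ h2 x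
      rw [this, hd1 x]
      by_cases hx : x ∈ ta <;> by_cases hxb : x ∈ tb <;> simp [hx, hxb]
    have hnb : ∀ v ∈ tb, v ∉ ta := by
      intro v hv hm
      have hn : ownLoop d1 1 tb = none := by
        rw [ownLoop_eq_none_iff]
        exact ⟨v, hv, 0, by rw [hd1 v]; simp [hm], by decide⟩
      simp [hn] at h2
    cases h3 : ownLoop d2 2 tc with
    | none =>
      have hcc : colOwnerCheck (ta, tb, tc) = false := by simp [colOwnerCheck, h1, h2, h3]
      rw [hcc]
      simp only [Bool.false_eq_true, false_iff]
      rw [ownLoop_eq_none_iff] at h3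
      obtain ⟨v, hv, j, hg, hj⟩ := h3
      rw [hd2 v] at hg
      rintro ⟨_, hc2⟩
      by_cases hva : v ∈ ta
      · exact (hc2 v hv).1 hva
      · by_cases hvb : v ∈ tb
        · exact (hc2 v hv).2 hvb
        · simp [hva, hvb] at hg
    | some d3 =>
      have hcc : colOwnerCheck (ta, tb, tc) = true := by simp [colOwnerCheck, h1, h2, h3]
      rw [hcc]
      refine iff_of_true rfl ⟨hnb, fun v hv => ?_⟩
      by_contra hcon
      have hmem : ∃ j, d2.get? v = some j ∧ j ≠ 2 := by
        rw [hd2 v]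
        by_cases hva : v ∈ ta
        · exact ⟨0, by simp [hva], by decide⟩
        · have hvb : v ∈ tb := by tauto
          exact ⟨1, by simp [hva, hvb], by decide⟩
      have hn : ownLoop d2 2 tc = none := by
        rw [ownLoop_eq_none_iff]; exact ⟨v, hv, hmem⟩
      simp [hn] at h3

theorem interCheckA_iff (t : List Int × List Int × List Int) :
    interCheckA t = true ↔
      (∀ v ∈ t.1, v ∉ t.2.1) ∧ (∀ v ∈ t.2.1, v ∉ t.2.2) ∧ (∀ v ∈ t.2.2, v ∉ t.1) := by
  obtain ⟨ta, tb, tc⟩ := t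
  have hs : ∀ (xs ys : List Int),
      (PySem.Set.inter (PySem.Set.ofList xs) (PySem.Set.ofList ys)).isEmpty = true ↔
        ∀ v ∈ xs, v ∉ ys := by
    intro xs ys
    rw [List.isEmpty_iff, List.eq_nil_iff_forall_not_mem]
    constructor
    · intro h v hv hvy
      exact h v (by rw [PySem.Set.mem_inter, PySem.Set.mem_ofList, PySem.Set.mem_ofList]; exact ⟨hv, hvy⟩)
    · intro h v hv
      rw [PySem.Set.mem_inter, PySem.Set.mem_ofList, PySem.Set.mem_ofList] at hv
      exact h v hv.1 hv.2
  simp only [interCheckA, Bool.not_eq_true', Bool.or_eq_false_iff, Bool.not_eq_false']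
  rw [hs ta tb, hs tb tc, hs tc ta]
  exact and_assoc

theorem interCheckA_eq_colOwnerCheck : interCheckA = colOwnerCheck := by
  funext t
  rw [Bool.eq_iff_iff, interCheckA_iff, colOwnerCheck_iff]
  obtain ⟨ta, tb, tc⟩ := t
  constructor
  · rintro ⟨hab, hbc, hca⟩
    exact ⟨fun v hvb hva => hab v hva hvb,
      fun v hvc => ⟨fun hva => hca v hvc hva, fun hvb => hbc v hvb hvc⟩⟩
  · rintro ⟨h1, h2⟩
    exact ⟨fun v hva hvb => h1 v hvb hva,
      fun v hvb hvc => (h2 v hvc).2 hvb,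
      fun v hvc => (h2 v hvc).1⟩

-- ===== VERDICT (by name: the statement is the Claim_ definition above) =====
theorem squares_possible_fit_spec : Claim_equal_squares_possible_fit := by
  intro s1 s2 s3 _
  unfold Spec_squares_possible_fit squares_possible_fit squares_possible_fit_alt
  rw [interCheckA_eq_colOwnerCheck]
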